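-- pv_equiv track=rewrite | github.com/asnower/DialFill-v2 | dataset_process/utils.py | mark_repeats_within_5grams
-- ===== SOURCE A (Python) =====
-- from collections import Counter, defaultdict
--
-- def mark_repeats_within_5grams(lst, min_ngram=1, max_ngram=5):
--     def count_ngrams(text, n):
--         ngrams = [tuple(text[i:i+n]) for i in range(len(text) - n + 1)]
--         return ngrams
--
--     mark = [1] * len(lst)
--     seen_ngrams = defaultdict(int)
--
--     for n in range(min_ngram, max_ngram+1):
--         ngrams = count_ngrams(lst, n)
--         for i in range(len(lst) - n + 1):
--             ngram = tuple(lst[i:i+n])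
--             seen_ngrams[ngram] += 1
--             if seen_ngrams[ngram] > 1:
--                 for j in range(i, i + n):
--                     if mark[j] == 1:
--                         mark[j] = -1
--
--     return mark
-- ===== SOURCE B (Python) =====
-- def mark_repeats_within_5grams(lst, min_ngram=1, max_ngram=5):
--     # Per-position decision: token j is -1 iff some n-gram window covering j
--     # is a non-first occurrence of its n-gram.
--     L = len(lst)
--
--     def covered(j):
--         for n in range(min_ngram, max_ngram + 1):
--             for i in range(max(0, j - n + 1), min(j, L - n) + 1):
--                 g = lst[i:i + n]
--                 if any(lst[k:k + n] == g for k in range(i)):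
--                     return True
--         return False
--
--     return [-1 if covered(j) else 1 for j in range(L)]
-- ===== Notes on version B (the rewrite author's own statement) =====
-- stated objective: simpler
-- what changed: Replaces A's stateful pass (mutable mark array + running defaultdict counter over all n and all starts) with a pure per-position predicate: token j is -1 iff some n-gram window covering j has an equal n-gram starting earlier; the result is a single comprehension with no mutable state.
-- outside the precondition, e.g. on mark_repeats_within_5grams(['a', 'c', 'a'], -2, 1): A returns [-1, -1, -1], B returns [1, 1, -1]
import Mathlib
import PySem

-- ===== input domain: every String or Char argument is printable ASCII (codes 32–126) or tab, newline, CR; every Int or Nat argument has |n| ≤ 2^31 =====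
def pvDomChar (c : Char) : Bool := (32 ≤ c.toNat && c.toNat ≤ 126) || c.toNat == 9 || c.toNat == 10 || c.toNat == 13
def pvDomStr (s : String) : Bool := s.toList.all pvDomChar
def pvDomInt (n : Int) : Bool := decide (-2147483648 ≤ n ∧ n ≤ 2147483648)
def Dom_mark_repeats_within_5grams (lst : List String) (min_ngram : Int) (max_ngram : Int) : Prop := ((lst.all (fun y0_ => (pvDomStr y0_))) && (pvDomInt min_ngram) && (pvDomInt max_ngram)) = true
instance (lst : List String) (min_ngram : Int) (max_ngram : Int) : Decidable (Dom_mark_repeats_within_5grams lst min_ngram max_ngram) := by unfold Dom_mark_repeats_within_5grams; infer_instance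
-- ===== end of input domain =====

-- B replaces A's stateful pass (mutable mark list + running n-gram counter) with a pure
-- per-position predicate computed by a comprehension; simpler, not faster.


-- ===== PORT A =====
-- lst[i:i+n] (shared by both ports: both Pythons take this slice)
def pvGram (lst : List String) (n i : Int) : List String :=
  PySem.List.slice lst (some i) (some (i + n))

-- body of 'for j in range(i, i+n): if mark[j] == 1: mark[j] = -1'
def pvMarkStep (mark : List Int) (j : Int) : List Int :=
  if PySem.List.pyGetD mark j 0 = 1 then PySem.List.pySetD mark j (-1) else mark

-- body of 'for i in range(len(lst) - n + 1): …'
def pvAStep (lst : List String) (n : Int) (st : List Int × PySem.Dict (List String) Int)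
    (i : Int) : List Int × PySem.Dict (List String) Int :=
  let ngram := pvGram lst n i
  let seen := st.2.modify ngram 0 (· + 1)
  if 1 < seen.getD ngram 0 then
    ((PySem.List.pyRange i (i + n) 1).foldl pvMarkStep st.1, seen)
  else (st.1, seen)

-- one iteration of 'for n in range(min_ngram, max_ngram+1)' (A's 'ngrams = count_ngrams(lst, n)' is unused dead code)
def pvAPass (lst : List String) (st : List Int × PySem.Dict (List String) Int)
    (n : Int) : List Int × PySem.Dict (List String) Int :=
  (PySem.List.pyRange 0 ((lst.length : Int) - n + 1) 1).foldl (pvAStep lst n) st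

def mark_repeats_within_5grams (lst : List String) (min_ngram : Int) (max_ngram : Int) : List Int :=
  ((PySem.List.pyRange min_ngram (max_ngram + 1) 1).foldl (pvAPass lst)
    (List.replicate lst.length 1, PySem.Dict.empty)).1

-- ===== PORT B =====
-- inner two loops of covered(j), for a fixed n
def pvCovN (lst : List String) (L j n : Int) : Bool :=
  (PySem.List.pyRange (max 0 (j - n + 1)) (min j (L - n) + 1) 1).any (fun i =>
    let g := pvGram lst n i
    (PySem.List.pyRange 0 i 1).any (fun k => pvGram lst n k == g))

-- covered(j)
def pvCovered (lst : List String) (L min_ngram max_ngram j : Int) : Bool :=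
  (PySem.List.pyRange min_ngram (max_ngram + 1) 1).any (fun n => pvCovN lst L j n)

def mark_repeats_within_5grams_alt (lst : List String) (min_ngram : Int) (max_ngram : Int) : List Int :=
  let L : Int := lst.length
  (PySem.List.pyRange 0 L 1).map (fun j => if pvCovered lst L min_ngram max_ngram j then -1 else 1)

-- ===== PRECONDITION & SPEC =====
-- Pre_ excludes negative min_ngram on a nonempty list with a nonempty n-range (outside the
-- natural domain of n-gram sizes): there A's slice lst[i:i+n] has a negative stop, wraps
-- around from the end, and pollutes the shared counter across n-passes — an artefact B does
-- not reproduce; the trivial corners (empty list, empty n-range) are still admitted.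
def Pre_mark_repeats_within_5grams (lst : List String) (min_ngram : Int) (max_ngram : Int) : Prop :=
  0 ≤ min_ngram ∨ max_ngram < min_ngram ∨ lst = []
instance (lst : List String) (min_ngram : Int) (max_ngram : Int) : Decidable (Pre_mark_repeats_within_5grams lst min_ngram max_ngram) := by unfold Pre_mark_repeats_within_5grams; infer_instance
def pvWitness_mark_repeats_within_5grams : List String × Int × Int := (["a", "b", "a"], 1, 5)

def Spec_mark_repeats_within_5grams (lst : List String) (min_ngram : Int) (max_ngram : Int) (out : List Int) : Prop := out = mark_repeats_within_5grams_alt lst min_ngram max_ngram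
instance (lst : List String) (min_ngram : Int) (max_ngram : Int) (out : List Int) : Decidable (Spec_mark_repeats_within_5grams lst min_ngram max_ngram out) := by unfold Spec_mark_repeats_within_5grams; infer_instance

-- ===== CLAIM (what is proved, stated in full; the proofs are below) =====
def Claim_equal_mark_repeats_within_5grams : Prop := ∀ (lst : List String) (min_ngram : Int) (max_ngram : Int), Dom_mark_repeats_within_5grams lst min_ngram max_ngram → Pre_mark_repeats_within_5grams lst min_ngram max_ngram → Spec_mark_repeats_within_5grams lst min_ngram max_ngram (mark_repeats_within_5grams lst min_ngram max_ngram)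

-- ===== LEMMAS AND PROOFS =====

-- proof helpers: "mark as a pointwise predicate" normal form
def pvMapQ (lst : List String) (Q : Int → Bool) : List Int :=
  (PySem.List.pyRange 0 (lst.length : Int) 1).map (fun j => if Q j then -1 else 1)

-- dict after counting the grams with starts in [0, m)
def pvDAcc (lst : List String) (n : Int) (base : PySem.Dict (List String) Int) (m : Int) :
    PySem.Dict (List String) Int :=
  ((PySem.List.pyRange 0 m 1).map (pvGram lst n)).foldl (fun d g => d.modify g 0 (· + 1)) base

-- "the n-gram at i already occurred before i"
def pvDup (lst : List String) (n i : Int) : Bool :=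
  (PySem.List.pyRange 0 i 1).any (fun k => pvGram lst n k == pvGram lst n i)

-- A-side coverage predicate accumulated from start i₀ of a pass
def pvCovFrom (lst : List String) (n i0 j : Int) : Bool :=
  (PySem.List.pyRange i0 ((lst.length : Int) - n + 1) 1).any (fun i =>
    (decide (i ≤ j) && decide (j < i + n)) && pvDup lst n i)

theorem pvMapQ_congr (lst : List String) (Q Q' : Int → Bool)
    (h : ∀ j : Int, 0 ≤ j → j < (lst.length : Int) → Q j = Q' j) :
    pvMapQ lst Q = pvMapQ lst Q' := by
  unfold pvMapQ
  apply List.map_congr_left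
  intro x hx
  rw [PySem.List.mem_pyRange_one] at hx
  rw [h x hx.1 hx.2]

theorem pv_replicate_eq (lst : List String) :
    List.replicate lst.length (1 : Int) = pvMapQ lst (fun _ => false) := by
  simp [pvMapQ, PySem.List.length_pyRange_one, List.map_const']

theorem pv_set_map (f : Int → Int) (L : Nat) (j : Nat) (v : Int) (_hj : j < L) :
    ((PySem.List.pyRange 0 (L : Int) 1).map f).set j v
      = (PySem.List.pyRange 0 (L : Int) 1).map (fun x => if x = (j : Int) then v else f x) := by
  apply List.ext_getElem
  · simp [PySem.List.length_pyRange_one]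
  · intro i h1 h2
    simp only [List.length_set, List.length_map, PySem.List.length_pyRange_one] at h1 h2
    rw [List.getElem_set, List.getElem_map, List.getElem_map,
        PySem.List.getElem_pyRange_one]
    by_cases hij : j = i
    · simp [hij]
    · have hij' : ¬ (j = i) := hij
      have hne : ¬ ((0 : Int) + (i : Int) = (j : Int)) := by omega
      rw [if_neg hij', if_neg hne]

theorem pv_markStep (lst : List String) (Q : Int → Bool) (w : Int)
    (h0 : 0 ≤ w) (h1 : w < (lst.length : Int)) :
    pvMarkStep (pvMapQ lst Q) w = pvMapQ lst (fun x => Q x || x == w) := by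
  unfold pvMarkStep
  rw [pvMapQ, PySem.List.pyGetD_map_pyRange_of_nonneg _ _ _ _ h0 h1]
  by_cases hQ : Q w
  · have : ¬ ((if Q w then (-1 : Int) else 1) = 1) := by simp [hQ]
    rw [if_neg this]
    apply pvMapQ_congr
    intro j _ _
    by_cases hjw : j = w
    · simp [hjw, hQ]
    · have : (j == w) = false := by simp [hjw]
      simp [this]
  · have : (if Q w then (-1 : Int) else 1) = 1 := by simp [hQ]
    rw [if_pos this, PySem.List.pySetD_of_nonneg _ _ h0]
    have hwnat : w = ((w.toNat : Nat) : Int) := by omega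
    have hlt : w.toNat < lst.length := by omega
    rw [pv_set_map _ _ _ _ hlt]
    apply List.map_congr_left
    intro x hx
    by_cases hxw : x = w
    · have e1 : (x == w) = true := by simp [hxw]
      have e2 : x = ((w.toNat : Nat) : Int) := by omega
      rw [if_pos e2]
      simp [e1]
    · have e1 : (x == w) = false := by simp [hxw]
      have e2 : ¬ (x = ((w.toNat : Nat) : Int)) := by omega
      rw [if_neg e2]
      simp [e1]

theorem pv_markFold (lst : List String) (ws : List Int) (Q : Int → Bool)
    (h : ∀ w ∈ ws, 0 ≤ w ∧ w < (lst.length : Int)) :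
    ws.foldl pvMarkStep (pvMapQ lst Q)
      = pvMapQ lst (fun x => Q x || ws.any (fun w => x == w)) := by
  induction ws generalizing Q with
  | nil => simp
  | cons w ws ih =>
    rw [List.foldl_cons, pv_markStep lst Q w (h w (by simp)).1 (h w (by simp)).2,
        ih _ (fun w' hw' => h w' (by simp [hw']))]
    apply pvMapQ_congr
    intro j _ _
    simp [Bool.or_assoc]

theorem pv_window_any (a b x : Int) :
    (PySem.List.pyRange a b 1).any (fun w => x == w) = (decide (a ≤ x) && decide (x < b)) := by
  by_cases h : a ≤ x ∧ x < b
  · have hx : x ∈ PySem.List.pyRange a b 1 := (PySem.List.mem_pyRange_one).mpr h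
    have : (PySem.List.pyRange a b 1).any (fun w => x == w) = true := by
      exact List.any_eq_true.mpr ⟨x, hx, by simp⟩
    rw [this]
    have h1' : decide (a ≤ x) = true := by simp [h.1]
    have h2' : decide (x < b) = true := by simp [h.2]
    rw [h1', h2']
    rfl
  · have : (PySem.List.pyRange a b 1).any (fun w => x == w) = false := by
      rw [List.any_eq_false]
      intro w hw
      rw [PySem.List.mem_pyRange_one] at hw
      simp only [beq_iff_eq]
      intro hxw
      exact h ⟨by omega, by omega⟩
    rw [this]
    rcases not_and_or.mp h with h' | h' <;> simp [h']

theorem pv_gram_len (lst : List String) (n i : Int) (hi : 0 ≤ i) (hn : 0 ≤ n)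
    (h : i + n ≤ (lst.length : Int)) : ((pvGram lst n i).length : Int) = n := by
  unfold pvGram
  rw [PySem.List.slice_toNat _ hi (by omega)]
  simp only [List.length_take, List.length_drop]
  omega

theorem pv_dacc_getD (lst : List String) (n : Int) (base : PySem.Dict (List String) Int)
    (m : Int) (g : List String) :
    (pvDAcc lst n base m).getD g 0
      = base.getD g 0 + ((PySem.List.pyRange 0 m 1).map (pvGram lst n)).count g := by
  unfold pvDAcc
  rw [PySem.Dict.getD_foldl_modify_add_one]

theorem pv_count_len_ne (lst : List String) (n m : Int) (hn : 0 ≤ n) (g : List String)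
    (hg : (g.length : Int) ≠ n) (hm : m ≤ (lst.length : Int) - n + 1) :
    ((PySem.List.pyRange 0 m 1).map (pvGram lst n)).count g = 0 := by
  rw [List.count_eq_zero]
  intro hmem
  rw [List.mem_map] at hmem
  obtain ⟨i, hi, hgi⟩ := hmem
  rw [PySem.List.mem_pyRange_one] at hi
  have hlen : ((pvGram lst n i).length : Int) = n :=
    pv_gram_len lst n i hi.1 hn (by omega)
  rw [hgi] at hlen
  exact hg hlen

theorem pv_dacc_zero (lst : List String) (n : Int) (base : PySem.Dict (List String) Int) :
    pvDAcc lst n base 0 = base := by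
  unfold pvDAcc
  rw [PySem.List.pyRange_one_eq_nil (le_refl 0)]
  rfl

theorem pv_pass (lst : List String) (n : Int) (hn : 0 ≤ n)
    (base : PySem.Dict (List String) Int)
    (hbase : ∀ g : List String, (g.length : Int) = n → base.getD g 0 = 0) :
    ∀ (m : Nat) (i0 : Int), ((lst.length : Int) - n + 1 - i0).toNat = m → 0 ≤ i0 →
    i0 ≤ (lst.length : Int) - n + 1 →
    ∀ Q : Int → Bool,
    (PySem.List.pyRange i0 ((lst.length : Int) - n + 1) 1).foldl (pvAStep lst n)
        (pvMapQ lst Q, pvDAcc lst n base i0)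
      = (pvMapQ lst (fun j => Q j || pvCovFrom lst n i0 j),
         pvDAcc lst n base ((lst.length : Int) - n + 1)) := by
  intro m
  induction m with
  | zero =>
    intro i0 hm hi0 hi0' Q
    have hie : i0 = (lst.length : Int) - n + 1 := by omega
    rw [PySem.List.pyRange_one_eq_nil (by omega), List.foldl_nil, hie]
    have : (fun j => Q j || pvCovFrom lst n ((lst.length : Int) - n + 1) j) = Q := by
      funext j
      unfold pvCovFrom
      rw [PySem.List.pyRange_one_eq_nil (by omega)]
      simp
    rw [this]
  | succ m ih =>
    intro i0 hm hi0 hi0' Q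
    have hlt : i0 < (lst.length : Int) - n + 1 := by omega
    have hi0n : i0 + n ≤ (lst.length : Int) := by omega
    have hlen : ((pvGram lst n i0).length : Int) = n := pv_gram_len lst n i0 hi0 hn hi0n
    have hseen : (pvDAcc lst n base i0).modify (pvGram lst n i0) 0 (· + 1)
        = pvDAcc lst n base (i0 + 1) := by
      unfold pvDAcc
      rw [PySem.List.pyRange_one_succ_right (by omega : (0 : Int) ≤ i0), List.map_append,
          List.foldl_append]
      rfl
    have hsplit : (((PySem.List.pyRange 0 (i0 + 1) 1).map (pvGram lst n)).count (pvGram lst n i0) : Int)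
        = (((PySem.List.pyRange 0 i0 1).map (pvGram lst n)).count (pvGram lst n i0) : Int) + 1 := by
      rw [PySem.List.pyRange_one_succ_right (by omega : (0 : Int) ≤ i0), List.map_append,
          List.count_append]
      push_cast
      simp
    have hdupiff : (0 < (((PySem.List.pyRange 0 i0 1).map (pvGram lst n)).count (pvGram lst n i0) : Int))
        ↔ pvDup lst n i0 = true := by
      rw [Int.natCast_pos, List.count_pos_iff, List.mem_map]
      unfold pvDup
      rw [List.any_eq_true]
      constructor
      · rintro ⟨k, hk, he⟩
        exact ⟨k, hk, by simp [he]⟩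
      · rintro ⟨k, hk, he⟩
        exact ⟨k, hk, by simpa using he⟩
    have hcond : (1 < (pvDAcc lst n base (i0 + 1)).getD (pvGram lst n i0) 0)
        ↔ pvDup lst n i0 = true := by
      rw [pv_dacc_getD, hbase _ hlen, hsplit]
      rw [← hdupiff]
      omega
    have hstep : pvAStep lst n (pvMapQ lst Q, pvDAcc lst n base i0) i0
        = (pvMapQ lst (fun x => Q x || (pvDup lst n i0 && (decide (i0 ≤ x) && decide (x < i0 + n)))),
           pvDAcc lst n base (i0 + 1)) := by
      unfold pvAStep
      dsimp only
      rw [hseen]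
      by_cases hdb : pvDup lst n i0 = true
      · rw [if_pos (hcond.mpr hdb)]
        rw [pv_markFold lst _ Q (fun w hw => by
          rw [PySem.List.mem_pyRange_one] at hw
          exact ⟨by omega, by omega⟩)]
        refine Prod.ext ?_ rfl
        show pvMapQ lst _ = pvMapQ lst _
        apply pvMapQ_congr
        intro x _ _
        rw [pv_window_any, hdb, Bool.true_and]
      · have hdb' : pvDup lst n i0 = false := by
          revert hdb; cases pvDup lst n i0 <;> simp
        rw [if_neg (fun hl => hdb (hcond.mp hl))]
        refine Prod.ext ?_ rfl
        show pvMapQ lst Q = pvMapQ lst _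
        apply pvMapQ_congr
        intro x _ _
        rw [hdb', Bool.false_and, Bool.or_false]
    rw [PySem.List.pyRange_one_cons hlt, List.foldl_cons, hstep,
        ih (i0 + 1) (by omega) (by omega) (by omega)]
    refine Prod.ext ?_ rfl
    show pvMapQ lst _ = pvMapQ lst _
    apply pvMapQ_congr
    intro j _ _
    unfold pvCovFrom
    rw [PySem.List.pyRange_one_cons hlt, List.any_cons]
    cases hQ : Q j <;> cases hd : pvDup lst n i0 <;>
      cases hw1 : decide (i0 ≤ j) <;> cases hw2 : decide (j < i0 + n) <;>
        simp

theorem pv_covFrom_zero (lst : List String) (n j : Int) :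
    pvCovFrom lst n 0 j = pvCovN lst (lst.length : Int) j n := by
  rw [Bool.eq_iff_iff]
  unfold pvCovFrom pvCovN pvDup
  simp only [List.any_eq_true, PySem.List.mem_pyRange_one, Bool.and_eq_true, decide_eq_true_eq]
  constructor
  · rintro ⟨i, hi, ⟨h1, h2⟩, hdup⟩
    exact ⟨i, ⟨by omega, by omega⟩, hdup⟩
  · rintro ⟨i, hi, hdup⟩
    exact ⟨i, ⟨by omega, by omega⟩, ⟨by omega, by omega⟩, hdup⟩

theorem pv_covN_empty (lst : List String) (n j : Int)
    (h : (lst.length : Int) - n + 1 ≤ 0) : pvCovN lst (lst.length : Int) j n = false := by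
  unfold pvCovN
  rw [PySem.List.pyRange_one_eq_nil (by omega : min j ((lst.length : Int) - n) + 1 ≤ max 0 (j - n + 1))]
  rfl

theorem pv_outer (lst : List String) (max_ngram : Int) :
    ∀ (m : Nat) (a : Int), (max_ngram + 1 - a).toNat = m → 0 ≤ a →
    ∀ (Q : Int → Bool) (d : PySem.Dict (List String) Int),
    (∀ g : List String, a ≤ (g.length : Int) → d.getD g 0 = 0) →
    ((PySem.List.pyRange a (max_ngram + 1) 1).foldl (pvAPass lst) (pvMapQ lst Q, d)).1
      = pvMapQ lst (fun j =>
          Q j || (PySem.List.pyRange a (max_ngram + 1) 1).any (fun nn => pvCovN lst (lst.length : Int) j nn)) := by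
  intro m
  induction m with
  | zero =>
    intro a hm ha Q d hd
    rw [PySem.List.pyRange_one_eq_nil (by omega)]
    simp only [List.foldl_nil, List.any_nil, Bool.or_false]
  | succ m ih =>
    intro a hm ha Q d hd
    have hlt : a < max_ngram + 1 := by omega
    rw [PySem.List.pyRange_one_cons hlt, List.foldl_cons]
    by_cases hcase : (lst.length : Int) - a + 1 ≤ 0
    · have hpass : pvAPass lst (pvMapQ lst Q, d) a = (pvMapQ lst Q, d) := by
        unfold pvAPass
        rw [PySem.List.pyRange_one_eq_nil (by omega), List.foldl_nil]
      rw [hpass, ih (a + 1) (by omega) (by omega) Q d (fun g hg => hd g (by omega))]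
      apply pvMapQ_congr
      intro j _ _
      rw [List.any_cons, pv_covN_empty lst a j hcase, Bool.false_or]
    · have hpass : pvAPass lst (pvMapQ lst Q, d) a
          = (pvMapQ lst (fun j => Q j || pvCovFrom lst a 0 j),
             pvDAcc lst a d ((lst.length : Int) - a + 1)) := by
        unfold pvAPass
        have := pv_pass lst a ha d (fun g hg => hd g (by omega))
          ((lst.length : Int) - a + 1 - 0).toNat 0 rfl (le_refl 0) (by omega) Q
        rw [pv_dacc_zero] at this
        exact this
      have hd' : ∀ g : List String, a + 1 ≤ (g.length : Int) →
          (pvDAcc lst a d ((lst.length : Int) - a + 1)).getD g 0 = 0 := by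
        intro g hg
        rw [pv_dacc_getD, hd g (by omega),
            pv_count_len_ne lst a ((lst.length : Int) - a + 1) ha g (by omega) (by omega)]
        rfl
      rw [hpass, ih (a + 1) (by omega) (by omega) _ _ hd']
      apply pvMapQ_congr
      intro j _ _
      rw [List.any_cons, pv_covFrom_zero]
      cases hQ : Q j <;> cases hc : pvCovN lst (lst.length : Int) j a <;> simp


theorem pv_markStep_nil (j : Int) : pvMarkStep [] j = [] := by
  unfold pvMarkStep
  simp [PySem.List.pyGetD, PySem.List.pyGet?]

theorem pv_markFold_nil (l : List Int) : l.foldl pvMarkStep [] = [] := by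
  induction l with
  | nil => rfl
  | cons x l ih => rw [List.foldl_cons, pv_markStep_nil, ih]

theorem pv_aStep_fst_nil (lst : List String) (n : Int)
    (st : List Int × PySem.Dict (List String) Int) (i : Int) (h : st.1 = []) :
    (pvAStep lst n st i).1 = [] := by
  unfold pvAStep
  dsimp only
  split
  · rw [h, pv_markFold_nil]
  · exact h

theorem pv_pass_fst_nil (lst : List String) (n : Int) (l : List Int) :
    ∀ st : List Int × PySem.Dict (List String) Int, st.1 = [] →
    (l.foldl (pvAStep lst n) st).1 = [] := by
  induction l with
  | nil => intro st h; exact h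
  | cons i l ih =>
    intro st h
    rw [List.foldl_cons]
    exact ih _ (pv_aStep_fst_nil lst n st i h)

theorem pv_outer_fst_nil (lst : List String) (ns : List Int) :
    ∀ st : List Int × PySem.Dict (List String) Int, st.1 = [] →
    (ns.foldl (pvAPass lst) st).1 = [] := by
  induction ns with
  | nil => intro st h; exact h
  | cons n ns ih =>
    intro st h
    rw [List.foldl_cons]
    exact ih _ (pv_pass_fst_nil lst n _ st h)


-- ===== VERDICT (by name: the statement is the Claim_ definition above) =====
theorem mark_repeats_within_5grams_spec : Claim_equal_mark_repeats_within_5grams := by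
  intro lst min_ngram max_ngram _ hpre
  unfold Spec_mark_repeats_within_5grams mark_repeats_within_5grams
  rcases hpre with hpre | hpre | hpre
  · rw [pv_replicate_eq,
        pv_outer lst max_ngram (max_ngram + 1 - min_ngram).toNat min_ngram rfl hpre
          (fun _ => false) PySem.Dict.empty (fun g _ => PySem.Dict.getD_empty g 0)]
    show pvMapQ lst _ = _
    unfold mark_repeats_within_5grams_alt
    show _ = pvMapQ lst (fun j => pvCovered lst (lst.length : Int) min_ngram max_ngram j)
    apply pvMapQ_congr
    intro j _ _
    rw [Bool.false_or]
    rfl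
  · rw [PySem.List.pyRange_one_eq_nil (by omega : max_ngram + 1 ≤ min_ngram), List.foldl_nil,
        pv_replicate_eq]
    unfold mark_repeats_within_5grams_alt
    show _ = pvMapQ lst (fun j => pvCovered lst (lst.length : Int) min_ngram max_ngram j)
    apply pvMapQ_congr
    intro j _ _
    unfold pvCovered
    rw [PySem.List.pyRange_one_eq_nil (by omega : max_ngram + 1 ≤ min_ngram)]
    rfl
  · subst hpre
    rw [pv_outer_fst_nil _ _ _ rfl]
    rfl
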